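-- pv_equiv track=rewrite | github.com/infosecconsultant/Password-Cracking-Dictionary-Generators | keyboard_walk.py | generate_walks
-- ===== SOURCE A (Python) =====
-- def get_adjacent_keys(key, keyboard):
--     """Find all adjacent keys for a given key."""
--     adjacent = []
--     for i in range(len(keyboard)):
--         for j in range(len(keyboard[i])):
--             if keyboard[i][j] == key:
--                 # Check all adjacent positions
--                 for x in range(-1, 2):
--                     for y in range(-1, 2):
--                         if 0 <= i + x < len(keyboard) and 0 <= j + y < len(keyboard[i + x]) and (x != 0 or y != 0):
--                             adjacent.append(keyboard[i + x][j + y])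
--     return adjacent
--
-- def generate_walks(start_key, length, keyboard, path="", walks=None):
--     """Recursively generate all walks of a given length starting from a specific key."""
--     if walks is None:
--         walks = []
--
--     if length == 0:
--         walks.append(path)
--         return walks
--
--     for adj_key in get_adjacent_keys(start_key, keyboard):
--         generate_walks(adj_key, length - 1, keyboard, path + adj_key, walks)
--
--     return walks
-- ===== SOURCE B (Python) =====
-- def get_adjacent_keys(key, keyboard):
--     """Find all adjacent keys for a given key."""
--     adjacent = []
--     for i in range(len(keyboard)):
--         for j in range(len(keyboard[i])):
--             if keyboard[i][j] == key:
--                 # Check all adjacent positions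
--                 for x in range(-1, 2):
--                     for y in range(-1, 2):
--                         if 0 <= i + x < len(keyboard) and 0 <= j + y < len(keyboard[i + x]) and (x != 0 or y != 0):
--                             adjacent.append(keyboard[i + x][j + y])
--     return adjacent
--
-- def generate_walks(start_key, length, keyboard, path="", walks=None):
--     """Iteratively generate all walks of a given length starting from a specific key:
--     a breadth-first frontier of (key, path) pairs is expanded until the remaining
--     step count hits 0 (then the frontier paths are the walks) or the frontier dies out."""
--     if walks is None:
--         walks = []
--     frontier = [(start_key, path)]
--     n = length
--     while n != 0 and frontier:
--         new_frontier = []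
--         for key, p in frontier:
--             for adj in get_adjacent_keys(key, keyboard):
--                 new_frontier.append((adj, p + adj))
--         frontier = new_frontier
--         n -= 1
--     if n == 0:
--         for _, p in frontier:
--             walks.append(p)
--     return walks
-- ===== Notes on version B (the rewrite author's own statement) =====
-- stated objective: alternative
-- what changed: Replaces the recursive DFS accumulator with an iterative breadth-first frontier: a list of (key, path) pairs is expanded while the step countdown is nonzero and the frontier is nonempty, and the final paths are appended to walks only when the countdown reached 0, eliminating recursion entirely.
import Mathlib
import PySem

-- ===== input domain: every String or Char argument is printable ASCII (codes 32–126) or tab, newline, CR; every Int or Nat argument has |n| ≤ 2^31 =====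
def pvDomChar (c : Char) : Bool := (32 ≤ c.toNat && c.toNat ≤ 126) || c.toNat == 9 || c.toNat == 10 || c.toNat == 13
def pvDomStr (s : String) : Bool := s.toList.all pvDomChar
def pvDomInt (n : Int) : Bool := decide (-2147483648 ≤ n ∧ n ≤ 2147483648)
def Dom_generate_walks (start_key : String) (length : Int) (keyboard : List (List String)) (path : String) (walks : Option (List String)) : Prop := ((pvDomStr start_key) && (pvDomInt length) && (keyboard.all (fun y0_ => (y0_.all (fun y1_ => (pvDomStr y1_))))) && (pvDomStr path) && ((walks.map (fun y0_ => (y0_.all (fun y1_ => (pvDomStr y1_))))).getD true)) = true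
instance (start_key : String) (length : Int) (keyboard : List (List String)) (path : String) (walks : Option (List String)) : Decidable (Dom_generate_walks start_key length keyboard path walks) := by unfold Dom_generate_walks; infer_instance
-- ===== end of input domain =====

-- B replaces A's recursive DFS by an iterative breadth-first frontier of (key, path) pairs
-- expanded while a step countdown is nonzero and the frontier is nonempty (objective:
-- alternative decomposition, no recursion); A mutates `walks` in place, B performs the same
-- mutation, the equivalence proved here is about the return value.

-- ===== PORT A =====
-- shared helper, transliteration of get_adjacent_keys (both Pythons contain it verbatim)
def get_adjacent_keys (key : String) (keyboard : List (List String)) : List String :=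
  (List.range keyboard.length).foldl (fun adjacent i =>
    (List.range (keyboard.getD i []).length).foldl (fun adjacent j =>
      if (keyboard.getD i []).getD j "" == key then
        (PySem.List.pyRange (-1) 2 1).foldl (fun adjacent x =>
          (PySem.List.pyRange (-1) 2 1).foldl (fun adjacent y =>
            if 0 ≤ (i : Int) + x ∧ (i : Int) + x < (keyboard.length : Int) ∧
               0 ≤ (j : Int) + y ∧ (j : Int) + y < ((PySem.List.pyGetD keyboard ((i : Int) + x) []).length : Int) ∧
               (x ≠ 0 ∨ y ≠ 0) then
              adjacent ++ [PySem.List.pyGetD (PySem.List.pyGetD keyboard ((i : Int) + x) []) ((j : Int) + y) ""]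
            else adjacent) adjacent) adjacent
      else adjacent) adjacent) []

-- A's recursion, step for step, with fuel length.toNat + 1 making it total; the fuel is
-- exhausted only where the Python recursion runs past any depth (there A raises
-- RecursionError, which Pre_ excludes)
def gwA_go (keyboard : List (List String)) : Nat → String → Int → String → List String → List String
  | 0, _, _, _, walks => walks
  | fuel + 1, start_key, len, path, walks =>
      if len = 0 then walks ++ [path]
      else
        (get_adjacent_keys start_key keyboard).foldl
          (fun w adj => gwA_go keyboard fuel adj (len - 1) (path ++ adj) w) walks

def generate_walks (start_key : String) (length : Int) (keyboard : List (List String)) (path : String) (walks : Option (List String)) : List String :=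
  gwA_go keyboard (length.toNat + 1) start_key length path (walks.getD [])

-- ===== PORT B =====
-- one frontier-expansion pass of Source B's inner loops
def gwB_step (keyboard : List (List String)) (frontier : List (String × String)) : List (String × String) :=
  frontier.foldl (fun new_frontier kp =>
    (get_adjacent_keys kp.1 keyboard).foldl
      (fun new_frontier adj => new_frontier ++ [(adj, kp.2 ++ adj)]) new_frontier) []

-- Source B's `while n != 0 and frontier:` countdown loop, returning the final (n, frontier);
-- fuel length.toNat + 1 covers every run of the Python loop that terminates (nonnegative n
-- runs at most n times; negative n terminates only if the very first expansion is empty)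
def gwB_loop (keyboard : List (List String)) : Nat → Int → List (String × String) → Int × List (String × String)
  | 0, n, frontier => (n, frontier)
  | fuel + 1, n, frontier =>
      if n ≠ 0 ∧ frontier ≠ [] then
        gwB_loop keyboard fuel (n - 1) (gwB_step keyboard frontier)
      else (n, frontier)

def generate_walks_alt (start_key : String) (length : Int) (keyboard : List (List String)) (path : String) (walks : Option (List String)) : List String :=
  let w := walks.getD []
  let r := gwB_loop keyboard (length.toNat + 1) length [(start_key, path)]
  if r.1 = 0 then r.2.foldl (fun w kp => w ++ [kp.2]) w else w

-- ===== PRECONDITION & SPEC =====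
-- Pre_ excludes exactly the inputs on which A's depth-`length` recursion does not return: any
-- input whose start key has adjacent keys and whose length is negative (unbounded recursion)
-- or beyond 900 (Python's recursion limit is ~1000; 900 is a conservative margin, so a narrow
-- band of lengths just above 900 on which A still returns is excluded with it). A returns
-- normally on everything Pre_ admits.
def Pre_generate_walks (start_key : String) (length : Int) (keyboard : List (List String)) (path : String) (walks : Option (List String)) : Prop :=
  (0 ≤ length ∧ length ≤ 900) ∨ get_adjacent_keys start_key keyboard = []
instance (start_key : String) (length : Int) (keyboard : List (List String)) (path : String) (walks : Option (List String)) : Decidable (Pre_generate_walks start_key length keyboard path walks) := by unfold Pre_generate_walks; infer_instance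

def pvWitness_generate_walks : String × Int × List (List String) × String × Option (List String) :=
  ("a", 1, [["a", "b"]], "", none)

def Spec_generate_walks (start_key : String) (length : Int) (keyboard : List (List String)) (path : String) (walks : Option (List String)) (out : List String) : Prop := out = generate_walks_alt start_key length keyboard path walks
instance (start_key : String) (length : Int) (keyboard : List (List String)) (path : String) (walks : Option (List String)) (out : List String) : Decidable (Spec_generate_walks start_key length keyboard path walks out) := by unfold Spec_generate_walks; infer_instance

-- ===== CLAIM (what is proved, stated in full; the proofs are below) =====
def Claim_equal_generate_walks : Prop := ∀ (start_key : String) (length : Int) (keyboard : List (List String)) (path : String) (walks : Option (List String)), Dom_generate_walks start_key length keyboard path walks → Pre_generate_walks start_key length keyboard path walks → Spec_generate_walks start_key length keyboard path walks (generate_walks start_key length keyboard path walks)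

-- ===== LEMMAS AND PROOFS =====

-- A's recursion with exact Nat depth (the clean shape the bridge lemmas are stated over)
def gwA_goN (start_key : String) (n : Nat) (keyboard : List (List String)) (path : String) (walks : List String) : List String :=
  match n with
  | 0 => walks ++ [path]
  | Nat.succ m =>
      (get_adjacent_keys start_key keyboard).foldl
        (fun w adj => gwA_goN adj m keyboard (path ++ adj) w) walks

-- one-step unfolding equations (definitional)
theorem gwA_go_succ_def (kb : List (List String)) (fuel : Nat) (s : String) (n : Int) (p : String) (w : List String) :
    gwA_go kb (fuel + 1) s n p w
      = (if n = 0 then w ++ [p]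
         else (get_adjacent_keys s kb).foldl (fun w adj => gwA_go kb fuel adj (n - 1) (p ++ adj) w) w) := rfl

theorem gwB_loop_succ_def (kb : List (List String)) (fuel : Nat) (n : Int) (fr : List (String × String)) :
    gwB_loop kb (fuel + 1) n fr
      = (if n ≠ 0 ∧ fr ≠ [] then gwB_loop kb fuel (n - 1) (gwB_step kb fr) else (n, fr)) := rfl

-- the fuelled Int port of A agrees with the Nat recursion when len = m and fuel = m + 1
theorem gwA_go_eq_goN (kb : List (List String)) :
    ∀ (m : Nat) (s p : String) (w : List String),
      gwA_go kb (m + 1) s (m : Int) p w = gwA_goN s m kb p w := by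
  intro m
  induction m with
  | zero => intro s p w; simp [gwA_go, gwA_goN]
  | succ k ih =>
      intro s p w
      have hne : ((k + 1 : Nat) : Int) ≠ 0 := by push_cast; omega
      have hf : (fun (w : List String) adj => gwA_go kb (k + 1) adj (((k + 1 : Nat) : Int) - 1) (p ++ adj) w)
          = fun w adj => gwA_goN adj k kb (p ++ adj) w := by
        funext w adj
        have h1 : (((k + 1 : Nat) : Int) - 1) = (k : Int) := by push_cast; ring
        rw [h1, ih]
      rw [gwA_go_succ_def, if_neg hne, hf]
      rfl

-- A's recursion applied across a whole frontier (the bridge between the two shapes)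
def Gfold (keyboard : List (List String)) (n : Nat) (frontier : List (String × String)) (w : List String) : List String :=
  frontier.foldl (fun w kp => gwA_goN kp.1 n keyboard kp.2 w) w

def expandKP (keyboard : List (List String)) (kp : String × String) : List (String × String) :=
  (get_adjacent_keys kp.1 keyboard).map (fun a => (a, kp.2 ++ a))

def stepN (keyboard : List (List String)) : Nat → List (String × String) → List (String × String)
  | 0, fr => fr
  | n + 1, fr => stepN keyboard n (gwB_step keyboard fr)

theorem gwB_step_eq (kb : List (List String)) (fr : List (String × String)) :
    gwB_step kb fr = fr.flatMap (expandKP kb) := by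
  have h : ∀ kp : String × String, ∀ nf : List (String × String),
      (get_adjacent_keys kp.1 kb).foldl (fun nf adj => nf ++ [(adj, kp.2 ++ adj)]) nf
        = nf ++ expandKP kb kp := by
    intro kp nf
    simpa [expandKP] using
      PySem.List.foldl_append_singleton_eq_map (fun a => (a, kp.2 ++ a)) (get_adjacent_keys kp.1 kb) nf
  unfold gwB_step
  simp only [h]
  simpa using PySem.List.foldl_append_eq_flatMap (expandKP kb) fr []

theorem Gfold_append (kb : List (List String)) (n : Nat) (f1 f2 : List (String × String)) (w : List String) :
    Gfold kb n (f1 ++ f2) w = Gfold kb n f2 (Gfold kb n f1 w) := by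
  simp [Gfold, List.foldl_append]

theorem Gfold_zero (kb : List (List String)) (fr : List (String × String)) (w : List String) :
    Gfold kb 0 fr w = w ++ fr.map Prod.snd := by
  simpa [Gfold, gwA_goN] using
    PySem.List.foldl_append_singleton_eq_map (Prod.snd) fr w

theorem gwA_goN_succ_eq (kb : List (List String)) (n : Nat) (k p : String) (w : List String) :
    gwA_goN k (n + 1) kb p w = Gfold kb n (expandKP kb (k, p)) w := by
  simp [gwA_goN, Gfold, expandKP, List.foldl_map]

theorem Gfold_succ (kb : List (List String)) (n : Nat) (fr : List (String × String)) (w : List String) :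
    Gfold kb (n + 1) fr w = Gfold kb n (gwB_step kb fr) w := by
  rw [gwB_step_eq]
  induction fr generalizing w with
  | nil => simp [Gfold]
  | cons kp rest ih =>
      have h1 : Gfold kb (n + 1) (kp :: rest) w
          = Gfold kb (n + 1) rest (gwA_goN kp.1 (n + 1) kb kp.2 w) := by
        simp [Gfold]
      rw [h1, gwA_goN_succ_eq kb n kp.1 kp.2 w, ih]
      have h2 : (kp :: rest).flatMap (expandKP kb) = expandKP kb kp ++ rest.flatMap (expandKP kb) := by
        simp
      rw [h2, Gfold_append]

theorem Gfold_eq_stepN (kb : List (List String)) (n : Nat) (fr : List (String × String)) (w : List String) :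
    Gfold kb n fr w = w ++ (stepN kb n fr).map Prod.snd := by
  induction n generalizing fr with
  | zero => simpa [stepN] using Gfold_zero kb fr w
  | succ m ih => rw [Gfold_succ, ih, stepN]

theorem stepN_nil (kb : List (List String)) (n : Nat) : stepN kb n [] = [] := by
  induction n with
  | zero => rfl
  | succ m ih => simpa [stepN, gwB_step] using ih

-- B's countdown loop started at n = m with fuel m + 1, followed by the conditional append,
-- produces exactly w ++ paths of the m-fold expansion
theorem gwB_loop_spec (kb : List (List String)) :
    ∀ (m : Nat) (fr : List (String × String)) (w : List String),
      (if (gwB_loop kb (m + 1) (m : Int) fr).1 = 0 then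
          (gwB_loop kb (m + 1) (m : Int) fr).2.foldl (fun w kp => w ++ [kp.2]) w
        else w)
        = w ++ (stepN kb m fr).map Prod.snd := by
  intro m
  induction m with
  | zero =>
      intro fr w
      simp only [Nat.cast_zero, gwB_loop, ne_eq, not_true_eq_false, false_and, if_false, stepN]
      simpa using PySem.List.foldl_append_singleton_eq_map (Prod.snd) fr w
  | succ k ih =>
      intro fr w
      have hne : ((k + 1 : Nat) : Int) ≠ 0 := by push_cast; omega
      by_cases hfr : fr = []
      · subst hfr
        rw [gwB_loop_succ_def]
        simp only [ne_eq, not_true_eq_false, and_false, if_false]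
        rw [if_neg hne]
        simp [stepN, gwB_step, stepN_nil]
      · have h1 : (((k + 1 : Nat) : Int) - 1) = (k : Int) := by push_cast; ring
        have h2 : gwB_loop kb (k + 1 + 1) ((k + 1 : Nat) : Int) fr
            = gwB_loop kb (k + 1) (k : Int) (gwB_step kb fr) := by
          rw [gwB_loop_succ_def, if_pos ⟨hne, hfr⟩, h1]
        rw [h2]
        rw [ih (gwB_step kb fr) w]
        rfl

-- ===== VERDICT (by name: the statement is the Claim_ definition above) =====
theorem generate_walks_spec : Claim_equal_generate_walks := by
  intro start_key length keyboard path walks _hDom hPre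
  unfold Spec_generate_walks generate_walks generate_walks_alt
  by_cases hnn : 0 ≤ length
  · -- nonnegative length: both sides reduce to the m-fold frontier expansion
    obtain ⟨m, hm⟩ : ∃ m : Nat, length = (m : Int) := ⟨length.toNat, (Int.toNat_of_nonneg hnn).symm⟩
    subst hm
    have htn : ((m : Int)).toNat = m := by simp
    rw [htn, gwA_go_eq_goN]
    have hA : gwA_goN start_key m keyboard path (walks.getD [])
        = Gfold keyboard m [(start_key, path)] (walks.getD []) := by
      simp [Gfold]
    rw [hA, Gfold_eq_stepN]
    exact (gwB_loop_spec keyboard m [(start_key, path)] (walks.getD [])).symm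
  · -- negative length: Pre_ forces an empty adjacency at the start key; A's fold over []
    -- returns walks unchanged, B's loop empties the frontier in one pass and n ≠ 0 skips the append
    have hadj : get_adjacent_keys start_key keyboard = [] := by
      rcases hPre with ⟨h0, _⟩ | h
      · exact absurd h0 hnn
      · exact h
    have hlt : length < 0 := by omega
    have htn : length.toNat = 0 := by omega
    have hne : length ≠ 0 := by omega
    have hstep : gwB_step keyboard [(start_key, path)] = [] := by
      simp [gwB_step, hadj]
    have hne2 : length - 1 ≠ 0 := by omega
    simp [htn, gwA_go, hne, hadj, gwB_loop, hstep, hne2]
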